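-- pv_equiv track=rewrite | github.com/FEZModding/FEZFX | extract_mgfx.py | split_metadata
-- ===== SOURCE A (Python) =====
-- from itertools import groupby
--
-- def split_metadata(metadata):
--     technique = ""
--     for name in ["TSM2", "ShaderModel2"]:
--         if name in metadata:
--             technique = name
--             break
--     assert technique
--
--     chunks = []
--     for k, g in groupby(metadata, lambda x: x == technique):
--         if not k:
--             chunks.append(list(g))
--
--     return chunks, technique
-- ===== SOURCE B (Python) =====
-- def split_metadata(metadata):
--     technique = ""
--     for name in ["TSM2", "ShaderModel2"]:
--         if name in metadata:
--             technique = name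
--             break
--     assert technique
--
--     cuts = [i for i, x in enumerate(metadata) if x == technique]
--     chunks = []
--     prev = 0
--     for c in cuts + [len(metadata)]:
--         seg = metadata[prev:c]
--         if seg:
--             chunks.append(seg)
--         prev = c + 1
--     return chunks, technique
-- ===== Notes on version B (the rewrite author's own statement) =====
-- stated objective: alternative
-- what changed: Instead of groupby's run-length grouping scan, B first collects the index positions of the technique separators, then cuts the list into slices between consecutive separator positions with a moving cursor, keeping the non-empty slices.
import Mathlib
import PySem

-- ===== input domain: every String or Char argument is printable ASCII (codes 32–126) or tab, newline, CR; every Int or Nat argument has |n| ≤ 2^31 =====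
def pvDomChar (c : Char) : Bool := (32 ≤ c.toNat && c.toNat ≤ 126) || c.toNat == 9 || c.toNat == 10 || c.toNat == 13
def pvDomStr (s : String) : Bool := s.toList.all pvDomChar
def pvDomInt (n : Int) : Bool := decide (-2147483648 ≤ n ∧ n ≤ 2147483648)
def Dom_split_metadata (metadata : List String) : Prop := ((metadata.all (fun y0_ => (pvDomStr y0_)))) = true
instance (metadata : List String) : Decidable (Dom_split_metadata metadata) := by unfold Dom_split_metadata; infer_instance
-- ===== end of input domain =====

-- B replaces A's groupby run-grouping with an index-the-separators-then-slice-between-cuts algorithm (alternative decomposition, same cost); A raises AssertionError when no technique name occurs, excluded by Pre_.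


-- ===== PORT A =====
-- itertools.groupby(metadata, lambda x: x == technique) as a list of (key, group) runs
def pvGroupby (technique : String) : List String → List (Bool × List String)
  | [] => []
  | x :: xs =>
    match pvGroupby technique xs with
    | [] => [((x == technique), [x])]
    | (k, g) :: rest =>
      if (x == technique) == k then (k, x :: g) :: rest
      else ((x == technique), [x]) :: (k, g) :: rest

def split_metadata (metadata : List String) : List (List String) × String :=
  let technique :=
    if metadata.contains "TSM2" then "TSM2"
    else if metadata.contains "ShaderModel2" then "ShaderModel2"
    else ""
  -- assert technique: raises exactly when technique = ""; excluded by Pre_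
  let chunks := (pvGroupby technique metadata).foldl
    (fun chunks kg => if kg.1 then chunks else chunks ++ [kg.2]) []
  (chunks, technique)

-- ===== PORT B =====
-- cuts = [i for i, x in enumerate(metadata) if x == technique]
def pvCutsB (technique : String) (metadata : List String) : List Int :=
  (PySem.List.enumerate metadata).filterMap
    (fun ix => if ix.2 == technique then some ix.1 else none)

-- for c in cuts + [len(metadata)]: seg = metadata[prev:c]; if seg: chunks.append(seg); prev = c + 1
def pvLoopB (metadata : List String) : List Int → Int → List (List String) → List (List String)
  | [], _, chunks => chunks
  | c :: cs, prev, chunks =>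
    let seg := PySem.List.slice metadata (some prev) (some c)
    pvLoopB metadata cs (c + 1) (if seg.isEmpty then chunks else chunks ++ [seg])

def split_metadata_alt (metadata : List String) : List (List String) × String :=
  let technique :=
    if metadata.contains "TSM2" then "TSM2"
    else if metadata.contains "ShaderModel2" then "ShaderModel2"
    else ""
  let cuts := pvCutsB technique metadata
  let chunks := pvLoopB metadata (cuts ++ [(metadata.length : Int)]) 0 []
  (chunks, technique)

-- ===== PRECONDITION & SPEC =====
-- Pre_ excludes exactly the inputs containing neither "TSM2" nor "ShaderModel2", on which A's assert raises AssertionError.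
def Pre_split_metadata (metadata : List String) : Prop :=
  "TSM2" ∈ metadata ∨ "ShaderModel2" ∈ metadata
instance (metadata : List String) : Decidable (Pre_split_metadata metadata) := by
  unfold Pre_split_metadata; infer_instance
def pvWitness_split_metadata : List String := ["a", "TSM2", "b"]

def Spec_split_metadata (metadata : List String) (out : List (List String) × String) : Prop := out = split_metadata_alt metadata
instance (metadata : List String) (out : List (List String) × String) : Decidable (Spec_split_metadata metadata out) := by unfold Spec_split_metadata; infer_instance

-- ===== CLAIM (what is proved, stated in full; the proofs are below) =====
def Claim_equal_split_metadata : Prop := ∀ (metadata : List String), Dom_split_metadata metadata → Pre_split_metadata metadata → Spec_split_metadata metadata (split_metadata metadata)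

-- ===== LEMMAS AND PROOFS =====

-- canonical splitter both ports are reduced to
def pvSplit (technique : String) (l : List String) : List (List String) :=
  match l with
  | [] => []
  | x :: xs =>
    if x == technique then pvSplit technique xs
    else (x :: xs.takeWhile (fun y => !(y == technique))) ::
         pvSplit technique (xs.dropWhile (fun y => !(y == technique)))
termination_by l.length
decreasing_by
  · simp
  · have := List.length_dropWhile_le (fun y => !(y == technique)) xs
    simp; omega

-- ---- A side ----

theorem pvGroupby_eq (technique x : String) (xs : List String) :
    pvGroupby technique (x :: xs) =
      ((x == technique), x :: xs.takeWhile (fun y => (y == technique) == (x == technique))) ::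
      pvGroupby technique (xs.dropWhile (fun y => (y == technique) == (x == technique))) := by
  induction xs generalizing x with
  | nil => simp [pvGroupby]
  | cons y ys ih =>
    have step : pvGroupby technique (x :: y :: ys) =
        match pvGroupby technique (y :: ys) with
        | [] => [((x == technique), [x])]
        | (k, g) :: rest =>
          if (x == technique) == k then (k, x :: g) :: rest
          else ((x == technique), [x]) :: (k, g) :: rest := rfl
    by_cases h : (y == technique) = (x == technique)
    · rw [step, ih y]
      dsimp only
      have hcond : ((x == technique) == (y == technique)) = true := by rw [h]; simp
      rw [hcond]
      simp only [if_true]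
      rw [List.takeWhile_cons_of_pos (by simpa using h),
          List.dropWhile_cons_of_pos (by simpa using h)]
      have hq : (fun z => (z == technique) == (y == technique))
          = (fun z => (z == technique) == (x == technique)) := by funext z; rw [h]
      rw [hq, h]
    · have hcond : ((x == technique) == (y == technique)) = false := by
        cases hb : (y == technique) <;> cases hc : (x == technique) <;> simp_all
      have hcond' : ((y == technique) == (x == technique)) = false := by
        cases hb : (y == technique) <;> cases hc : (x == technique) <;> simp_all
      rw [step, ih y]
      dsimp only
      rw [hcond]
      simp only [Bool.false_eq_true, if_false]
      rw [List.takeWhile_cons_of_neg (by simp [hcond']),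
          List.dropWhile_cons_of_neg (by simp [hcond'])]
      rw [← ih y]

theorem pvSplit_dropWhile (technique : String) (xs : List String) :
    pvSplit technique (xs.dropWhile (fun y => y == technique)) = pvSplit technique xs := by
  induction xs with
  | nil => rfl
  | cons y ys ih =>
    by_cases h : (y == technique) = true
    · rw [List.dropWhile_cons_of_pos (p := fun z => z == technique) h, ih]
      conv_rhs => rw [pvSplit]
      rw [if_pos h]
    · rw [List.dropWhile_cons_of_neg (p := fun z => z == technique) (by simp [h])]

theorem pvA_core (technique : String) :
    ∀ (n : Nat) (l : List String), l.length ≤ n →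
      ((pvGroupby technique l).filter (fun kg => !kg.1)).map (fun kg => kg.2)
        = pvSplit technique l := by
  intro n
  induction n with
  | zero =>
    intro l hl
    have : l = [] := List.eq_nil_of_length_eq_zero (by omega)
    subst this; simp [pvGroupby, pvSplit]
  | succ n ih =>
    intro l hl
    match l with
    | [] => simp [pvGroupby, pvSplit]
    | x :: xs =>
      rw [pvGroupby_eq]
      by_cases hx : (x == technique) = true
      · have hpred : (fun y => (y == technique) == (x == technique))
            = (fun y => y == technique) := by funext y; simp [hx]
        rw [hpred]
        rw [List.filter_cons_of_neg (by simp [hx])]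
        rw [ih _ (le_trans (List.length_dropWhile_le _ _) (by simp at hl; omega))]
        rw [pvSplit_dropWhile]
        conv_rhs => rw [pvSplit]
        rw [if_pos hx]
      · have hx' : (x == technique) = false := by simpa using hx
        have hpred : (fun y => (y == technique) == (x == technique))
            = (fun y => !(y == technique)) := by funext y; simp [hx']
        rw [hpred]
        rw [List.filter_cons_of_pos (by simp [hx'])]
        rw [List.map_cons]
        rw [ih _ (le_trans (List.length_dropWhile_le _ _) (by simp at hl; omega))]
        conv_rhs => rw [pvSplit]
        rw [if_neg (by simp [hx'])]

-- ---- B side ----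

theorem pvCutsB_aux (technique : String) (xs : List String) :
    ∀ (s t : Int),
      (PySem.List.enumerate xs (s + t)).filterMap
          (fun ix => if ix.2 == technique then some ix.1 else none)
        = ((PySem.List.enumerate xs s).filterMap
            (fun ix => if ix.2 == technique then some ix.1 else none)).map (· + t) := by
  induction xs with
  | nil => intro s t; simp [PySem.List.enumerate_nil]
  | cons x xs ih =>
    intro s t
    rw [PySem.List.enumerate_cons, PySem.List.enumerate_cons]
    by_cases h : (x == technique) = true
    · simp only [List.filterMap_cons, h]
      rw [show s + t + 1 = (s + 1) + t by ring, ih]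
      simp
    · simp only [List.filterMap_cons, h]
      rw [show s + t + 1 = (s + 1) + t by ring, ih]
      simp

theorem pvCutsB_cons (technique x : String) (xs : List String) :
    pvCutsB technique (x :: xs)
      = (if x == technique then [(0 : Int)] else [])
          ++ (pvCutsB technique xs).map (· + 1) := by
  unfold pvCutsB
  rw [PySem.List.enumerate_cons]
  have h1 := pvCutsB_aux technique xs 0 1
  simp only [zero_add] at h1
  simp only [zero_add]
  by_cases h : (x == technique) = true
  all_goals rw [List.filterMap_cons, h1]
  · simp [h]
  · simp [h]

theorem pvCutsB_nonneg (technique : String) (xs : List String) :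
    ∀ c ∈ pvCutsB technique xs, 0 ≤ c := by
  induction xs with
  | nil =>
    intro c hc
    have hnil : pvCutsB technique [] = [] := rfl
    rw [hnil] at hc
    exact absurd hc (List.not_mem_nil)
  | cons x xs ih =>
    intro c hc
    rw [pvCutsB_cons] at hc
    rcases List.mem_append.mp hc with h | h
    · split at h <;> simp at h; omega
    · rcases List.mem_map.mp h with ⟨d, hd, rfl⟩
      have := ih d hd; omega

-- prepend the accumulated chunks
theorem pvLoopB_acc (l : List String) (cs : List Int) :
    ∀ (prev : Int) (chunks : List (List String)),
      pvLoopB l cs prev chunks = chunks ++ pvLoopB l cs prev [] := by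
  induction cs with
  | nil => intro prev chunks; simp [pvLoopB]
  | cons c cs ih =>
    intro prev chunks
    rw [pvLoopB, pvLoopB]
    split
    · exact ih _ _
    · rw [ih _ (chunks ++ _), ih _ ([] ++ _)]
      simp

theorem pvSlice_shift (l : List String) (i j : Int) (m : Nat)
    (hi : 0 ≤ i) (hj : 0 ≤ j) :
    PySem.List.slice l (some (i + (m : Int))) (some (j + (m : Int)))
      = PySem.List.slice (l.drop m) (some i) (some j) := by
  rw [PySem.List.slice_toNat _ (by omega) (by omega),
      PySem.List.slice_toNat _ hi hj]
  rw [List.drop_drop]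
  congr 1
  · omega
  · congr 1; omega

theorem pvLoopB_shift (l : List String) (m : Nat) :
    ∀ (cs : List Int) (prev : Int) (chunks : List (List String)),
      0 ≤ prev → (∀ c ∈ cs, 0 ≤ c) →
      pvLoopB l (cs.map (· + (m : Int))) (prev + (m : Int)) chunks
        = pvLoopB (l.drop m) cs prev chunks := by
  intro cs
  induction cs with
  | nil => intro prev chunks _ _; rfl
  | cons c cs ih =>
    intro prev chunks hprev hcs
    rw [List.map_cons, pvLoopB, pvLoopB]
    rw [pvSlice_shift l prev c m hprev (hcs c (by simp))]
    rw [show c + (m : Int) + 1 = (c + 1) + (m : Int) by ring]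
    exact ih (c + 1) _ (by have := hcs c (by simp); omega)
      (fun d hd => hcs d (by simp [hd]))

theorem pvCutsB_prefix (technique : String) :
    ∀ (pre m : List String), (∀ y ∈ pre, (y == technique) = false) →
      pvCutsB technique (pre ++ m) = (pvCutsB technique m).map (· + (pre.length : Int)) := by
  intro pre
  induction pre with
  | nil => intro m _; simp
  | cons y ys ih =>
    intro m h
    rw [List.cons_append, pvCutsB_cons, h y (by simp), ih m (fun z hz => h z (by simp [hz]))]
    simp only [Bool.false_eq_true, if_false, List.nil_append, List.length_cons, List.map_map]
    apply List.map_congr_left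
    intro a _
    simp
    ring

theorem pvDropWhile_head_false {q : String → Bool} {xs : List String} {t : String} {rs : List String}
    (h : xs.dropWhile q = t :: rs) : q t = false := by
  induction xs with
  | nil => simp at h
  | cons y ys ih =>
    rw [List.dropWhile_cons] at h
    split at h
    · exact ih h
    · cases h; simp_all

theorem pvB_core (technique : String) :
    ∀ (n : Nat) (l : List String), l.length ≤ n →
      pvLoopB l (pvCutsB technique l ++ [(l.length : Int)]) 0 []
        = pvSplit technique l := by
  intro n
  induction n with
  | zero =>
    intro l hl
    have : l = [] := List.eq_nil_of_length_eq_zero (by omega)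
    subst this
    simp [pvCutsB, PySem.List.enumerate_nil, pvLoopB, PySem.List.slice_toNat _ le_rfl le_rfl]
    rw [pvSplit]
  | succ n ih =>
    intro l hl
    match l with
    | [] =>
      simp [pvCutsB, PySem.List.enumerate_nil, pvLoopB, PySem.List.slice_toNat _ le_rfl le_rfl]
      rw [pvSplit]
    | x :: xs =>
      by_cases hx : (x == technique) = true
      · rw [pvCutsB_cons, hx, if_pos rfl, List.cons_append, List.nil_append,
           List.cons_append]
        rw [pvLoopB]
        rw [PySem.List.slice_toNat _ le_rfl le_rfl]
        simp only [Int.toNat_zero, Nat.sub_self, List.take_zero, List.drop_zero,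
          List.isEmpty_nil, if_true]
        have hlen : ((x :: xs).length : Int) = (xs.length : Int) + 1 := by
          simp
        rw [hlen, show (pvCutsB technique xs).map (· + 1) ++ [(xs.length : Int) + 1]
              = (pvCutsB technique xs ++ [(xs.length : Int)]).map (· + ((1 : Nat) : Int)) by simp]
        rw [show (0 : Int) + 1 = 0 + ((1 : Nat) : Int) by simp]
        rw [pvLoopB_shift (x :: xs) 1 _ 0 [] le_rfl
            (by intro c hc; rcases List.mem_append.mp hc with h | h
                · exact pvCutsB_nonneg technique xs c h
                · simp at h; omega)]
        rw [List.drop_one, List.tail_cons]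
        rw [ih xs (by simp at hl; omega)]
        conv_rhs => rw [pvSplit]
        rw [if_pos hx]
      · -- head is not a separator
        have hx' : (x == technique) = false := by simpa using hx
        set q : String → Bool := fun y => !(y == technique) with hq
        rcases hrest : xs.dropWhile q with _ | ⟨t, rs⟩
        · -- no separator at all in l
          have htw : xs.takeWhile q = xs := by
            have h1 := List.takeWhile_append_dropWhile (p := q) (l := xs)
            rw [hrest] at h1; simpa using h1
          have hcuts : pvCutsB technique (x :: xs) = [] := by
            have hall : ∀ y ∈ x :: xs, (y == technique) = false := by
              intro y hy
              rcases List.mem_cons.mp hy with rfl | hy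
              · exact hx'
              · have hy' : y ∈ xs.takeWhile q := by rw [htw]; exact hy
                have := List.mem_takeWhile_imp hy'
                simpa [hq] using this
            have := pvCutsB_prefix technique (x :: xs) [] hall
            simpa using this
          rw [hcuts, List.nil_append, pvLoopB]
          rw [PySem.List.slice_toNat _ le_rfl (by positivity)]
          simp only [Int.toNat_zero, List.drop_zero, Int.toNat_natCast, Nat.sub_zero,
            List.take_length]
          simp only [List.isEmpty_cons, Bool.false_eq_true, if_false]
          rw [pvLoopB]
          rw [pvSplit]
          simp only [hx', Bool.false_eq_true, if_false, ← hq, htw, hrest]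
          simp [pvSplit]
        · -- l = (x :: takeWhile q xs) ++ t :: rs with t a separator
          have ht : (t == technique) = true := by
            have := pvDropWhile_head_false hrest
            simpa [hq] using this
          set tw : List String := x :: xs.takeWhile q with htw
          have hdecomp : x :: xs = tw ++ t :: rs := by
            rw [htw, List.cons_append, ← hrest, List.takeWhile_append_dropWhile]
          have htwall : ∀ y ∈ tw, (y == technique) = false := by
            intro y hy
            rcases List.mem_cons.mp hy with rfl | hy
            · exact hx'
            · have := List.mem_takeWhile_imp hy; simpa [hq] using this
          -- cuts of l
          have hcuts : pvCutsB technique (x :: xs)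
              = (tw.length : Int) :: (pvCutsB technique rs).map (· + ((tw.length : Int) + 1)) := by
            rw [hdecomp, pvCutsB_prefix technique tw (t :: rs) htwall, pvCutsB_cons, ht]
            simp only [if_true, List.cons_append, List.nil_append, List.map_cons,
              List.map_map, zero_add]
            apply List.cons_eq_cons.mpr
            refine ⟨rfl, ?_⟩
            apply List.map_congr_left
            intro a _
            simp
            ring
          rw [hcuts]
          have hlen : ((x :: xs).length : Int) = (rs.length : Int) + ((tw.length : Int) + 1) := by
            rw [hdecomp]; simp; ring
          rw [hlen]
          rw [List.cons_append, pvLoopB]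
          -- first slice is tw
          have hslice : PySem.List.slice (x :: xs) (some 0) (some (tw.length : Int)) = tw := by
            rw [PySem.List.slice_toNat _ le_rfl (by positivity)]
            simp only [Int.toNat_zero, List.drop_zero, Int.toNat_natCast, Nat.sub_zero]
            rw [hdecomp, List.take_left]
          rw [hslice]
          simp only [htw, List.isEmpty_cons, Bool.false_eq_true, if_false]
          have hmap : (pvCutsB technique rs).map (· + ((tw.length : Int) + 1)) ++ [(rs.length : Int) + ((tw.length : Int) + 1)]
              = (pvCutsB technique rs ++ [(rs.length : Int)]).map (· + ((tw.length + 1 : Nat) : Int)) := by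
            simp
          rw [hmap]
          rw [show (tw.length : Int) + 1 = 0 + ((tw.length + 1 : Nat) : Int) by push_cast; ring]
          rw [pvLoopB_shift (x :: xs) (tw.length + 1) _ 0 _ le_rfl
              (by intro c hc; rcases List.mem_append.mp hc with h | h
                  · exact pvCutsB_nonneg technique rs c h
                  · simp at h; omega)]
          have hdrop : (x :: xs).drop (tw.length + 1) = rs := by
            rw [hdecomp, show tw.length + 1 = (tw ++ [t]).length by simp,
              show tw ++ t :: rs = (tw ++ [t]) ++ rs by simp, List.drop_left]
          rw [hdrop]
          rw [pvLoopB_acc]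
          have hrs : rs.length ≤ n := by
            have h2 := congrArg List.length hdecomp
            simp at h2 hl
            omega
          rw [ih rs hrs]
          -- pvSplit side
          rw [pvSplit]
          simp only [hx', Bool.false_eq_true, if_false, ← hq, hrest]
          rw [pvSplit]
          simp [ht]


-- fold of A rewritten as filter+map
theorem pvA_fold (technique : String) (l : List String) :
    (pvGroupby technique l).foldl
        (fun chunks kg => if kg.1 then chunks else chunks ++ [kg.2]) []
      = ((pvGroupby technique l).filter (fun kg => !kg.1)).map (fun kg => kg.2) := by
  have h : (fun (chunks : List (List String)) (kg : Bool × List String) =>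
      if kg.1 then chunks else chunks ++ [kg.2])
      = (fun chunks kg => if (!kg.1) = true then chunks ++ [kg.2] else chunks) := by
    funext chunks kg
    by_cases hk : kg.1 = true <;> simp [hk]
  rw [h, PySem.List.foldl_append_if]
  simp

-- ===== VERDICT (by name: the statement is the Claim_ definition above) =====
theorem split_metadata_spec : Claim_equal_split_metadata := by
  intro metadata _ _
  unfold Spec_split_metadata split_metadata split_metadata_alt
  simp only []
  congr 1
  rw [pvA_fold]
  rw [pvA_core _ metadata.length metadata le_rfl]
  rw [pvB_core _ metadata.length metadata le_rfl]
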